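-- pv_equiv track=rewrite | github.com/kk3k02/General-moudlar-Adder | n_Bit_LadnerFischer_Adder.py | parallel_prefix
-- ===== SOURCE A (Python) =====
-- def parallel_prefix(n, g_0, p_0):
--     p_prime = [0] * n
--     g_prime = [0] * n
--
--     for i in range(n):
--         p_prime[i] = p_0[i]
--         g_prime[i] = g_0[i]
--
--     white_cells = 0
--     black_cells = 0
--     counter = 0
--
--     k = 0
--
--     while (2**k) < n:
--         k = k + 1
--
--
--     for i in range(0, k):
--
--         for j in range((n - 1), -1, -1):
--
--             if white_cells >= (2 ** i):
--
--                 if black_cells < (2 ** i):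
--
--                     g_prime[j] = g_prime[j] or (g_prime[j + 1] and p_prime[j])
--
--                     if counter < (2 ** i):
--                         p_prime[j] = p_prime[j] and p_prime[j + 1]
--                         counter = counter + 1
--
--                     black_cells = black_cells + 1
--
--                 else:
--                     white_cells = 0
--                     black_cells = 0
--
--             else:
--                 white_cells = white_cells + 1
--
--             if j == 0:
--                 white_cells = 0
--                 black_cells = 0
--                 counter = 0
--
--     return g_prime
-- ===== SOURCE B (Python) =====
-- def parallel_prefix(n, g_0, p_0):
--     # Single backward linear scan: build [G[n-1], ..., G[0]] reversed, then flip.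
--     res = []
--     for i in range(n - 1, -1, -1):
--         if res:
--             res.append(g_0[i] or (res[-1] and p_0[i]))
--         else:
--             res.append(g_0[i])
--     res.reverse()
--     return res
-- ===== Notes on version B (the rewrite author's own statement) =====
-- stated objective: faster
-- what changed: Replaces the multi-pass white/black/counter prefix network (k=ceil(log2 n) sweeps over the whole array with cell-state bookkeeping) by one backward linear scan that ripples the carry-generate signal G[j] = g[j] or (G[j+1] and p[j]).
import Mathlib
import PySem

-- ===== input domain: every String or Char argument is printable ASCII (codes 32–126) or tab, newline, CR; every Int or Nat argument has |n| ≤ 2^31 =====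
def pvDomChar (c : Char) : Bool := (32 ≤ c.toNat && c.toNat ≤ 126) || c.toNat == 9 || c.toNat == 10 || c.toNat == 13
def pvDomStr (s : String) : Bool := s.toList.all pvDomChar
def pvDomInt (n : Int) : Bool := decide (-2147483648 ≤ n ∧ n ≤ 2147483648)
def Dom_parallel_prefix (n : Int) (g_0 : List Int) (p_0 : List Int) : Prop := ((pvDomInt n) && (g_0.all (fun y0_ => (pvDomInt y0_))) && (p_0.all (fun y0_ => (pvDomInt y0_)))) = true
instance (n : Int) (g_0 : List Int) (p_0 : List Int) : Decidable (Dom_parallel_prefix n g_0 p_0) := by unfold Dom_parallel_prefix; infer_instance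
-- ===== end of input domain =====

-- B replaces A's multi-pass white/black/counter prefix network by one backward
-- linear ripple scan G[j] = g[j] or (G[j+1] and p[j]); asymptotically faster (O(n) vs O(n log n)).


-- ===== PORT A =====
-- Python `x or y` on ints (returns x if truthy else y)
def pvOr (x y : Int) : Int := if x = 0 then y else x
-- Python `x and y` on ints (returns x if falsy — i.e. 0 — else y)
def pvAnd (x y : Int) : Int := if x = 0 then 0 else y

-- `k = 0; while (2**k) < n: k = k + 1`
def pvKCalc (n : Int) (k : Nat) : Nat :=
  if (2:Int) ^ k < n then pvKCalc n (k + 1) else k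
termination_by (n - (2:Int) ^ k).toNat
decreasing_by
  have h1 : (2:Int) ^ k < (2:Int) ^ (k+1) := by
    have : (2:Int) ^ (k+1) = (2:Int) ^ k * 2 := pow_succ 2 k
    have h2 : (0:Int) < 2 ^ k := pow_pos (by norm_num) k
    omega
  omega

structure PvSt where
  gl : List Int
  pl : List Int
  w : Int
  b : Int
  c : Int

-- body of the inner `for j in range(n-1, -1, -1)` loop (state: g_prime, p_prime, white_cells,
-- black_cells, counter).  Array reads use pyGetD (default 0): exact under Pre_, where every
-- executed index is in range; 2**i is exact since i comes from range(0, k) so i ≥ 0.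
def pvInnerStep (i : Int) (st : PvSt) (j : Int) : PvSt :=
  let twoI : Int := (2:Int) ^ i.toNat
  let st1 : PvSt :=
    if twoI ≤ st.w then
      if st.b < twoI then
        let gl' := PySem.List.pySetD st.gl j
          (pvOr (PySem.List.pyGetD st.gl j 0)
                (pvAnd (PySem.List.pyGetD st.gl (j+1) 0) (PySem.List.pyGetD st.pl j 0)))
        if st.c < twoI then
          ⟨gl', PySem.List.pySetD st.pl j
                  (pvAnd (PySem.List.pyGetD st.pl j 0) (PySem.List.pyGetD st.pl (j+1) 0)),
           st.w, st.b + 1, st.c + 1⟩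
        else ⟨gl', st.pl, st.w, st.b + 1, st.c⟩
      else ⟨st.gl, st.pl, 0, 0, st.c⟩
    else ⟨st.gl, st.pl, st.w + 1, st.b, st.c⟩
  if j = 0 then ⟨st1.gl, st1.pl, 0, 0, 0⟩ else st1

def parallel_prefix (n : Int) (g_0 : List Int) (p_0 : List Int) : List Int :=
  -- p_prime = [0]*n; g_prime = [0]*n; for i in range(n): p_prime[i] = p_0[i]; g_prime[i] = g_0[i]
  let init : List Int × List Int :=
    (PySem.List.pyRange 0 n 1).foldl
      (fun st i => (PySem.List.pySetD st.1 i (PySem.List.pyGetD p_0 i 0),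
                    PySem.List.pySetD st.2 i (PySem.List.pyGetD g_0 i 0)))
      (List.replicate n.toNat 0, List.replicate n.toNat 0)
  let k := pvKCalc n 0
  -- for i in range(0, k): for j in range(n-1, -1, -1): …
  let fin :=
    (PySem.List.pyRange 0 (k : Int) 1).foldl
      (fun st i => (PySem.List.pyRange (n-1) (-1) (-1)).foldl (pvInnerStep i) st)
      ⟨init.2, init.1, 0, 0, 0⟩
  fin.gl

-- ===== PORT B =====
-- acc holds Python's `res` in reversed order (append → cons, res[-1] → head), so the final
-- res.reverse() is the identity on this representation.
def parallel_prefix_alt (n : Int) (g_0 : List Int) (p_0 : List Int) : List Int :=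
  (PySem.List.pyRange (n-1) (-1) (-1)).foldl
    (fun res i =>
      match res with
      | [] => [PySem.List.pyGetD g_0 i 0]
      | h :: t =>
        (pvOr (PySem.List.pyGetD g_0 i 0) (pvAnd h (PySem.List.pyGetD p_0 i 0))) :: h :: t)
    []

-- ===== PRECONDITION & SPEC =====
-- A raises IndexError (p_0[i] / g_0[i] in its copy loop) exactly when n exceeds either length.
def Pre_parallel_prefix (n : Int) (g_0 : List Int) (p_0 : List Int) : Prop :=
  n ≤ (g_0.length : Int) ∧ n ≤ (p_0.length : Int)
instance (n : Int) (g_0 : List Int) (p_0 : List Int) : Decidable (Pre_parallel_prefix n g_0 p_0) := by unfold Pre_parallel_prefix; infer_instance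

def pvWitness_parallel_prefix : Int × List Int × List Int := (3, [0, 1, 0], [1, 0, 1])

def Spec_parallel_prefix (n : Int) (g_0 : List Int) (p_0 : List Int) (out : List Int) : Prop := out = parallel_prefix_alt n g_0 p_0
instance (n : Int) (g_0 : List Int) (p_0 : List Int) (out : List Int) : Decidable (Spec_parallel_prefix n g_0 p_0 out) := by unfold Spec_parallel_prefix; infer_instance

-- ===== CLAIM (what is proved, stated in full; the proofs are below) =====
def Claim_equal_parallel_prefix : Prop := ∀ (n : Int) (g_0 : List Int) (p_0 : List Int), Dom_parallel_prefix n g_0 p_0 → Pre_parallel_prefix n g_0 p_0 → Spec_parallel_prefix n g_0 p_0 (parallel_prefix n g_0 p_0)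

-- ===== LEMMAS AND PROOFS =====

-- Reference function: the backward carry ripple, structurally on the two lists.
def pvRipple : List Int → List Int → List Int
  | [], _ => []
  | a :: g, [] => a :: g
  | a :: g, b :: p =>
    match pvRipple g p with
    | [] => [a]
    | h :: t => pvOr a (pvAnd h b) :: h :: t

theorem pvRipple_cons (a b : Int) (g p : List Int) :
    pvRipple (a :: g) (b :: p) =
      (match pvRipple g p with | [] => a | h :: _ => pvOr a (pvAnd h b)) :: pvRipple g p := by
  cases hgp : pvRipple g p <;> simp [pvRipple, hgp]

theorem pvRipple_length (g p : List Int) : (pvRipple g p).length = g.length := by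
  induction g generalizing p with
  | nil => simp [pvRipple]
  | cons a g ih =>
    cases p with
    | nil => simp [pvRipple]
    | cons b p => rw [pvRipple_cons]; simp [ih]

theorem pv_getD_set_self (l : List Int) (i : Nat) (v : Int) (h : i < l.length) :
    (l.set i v).getD i 0 = v := by
  simp [List.getD_eq_getElem?_getD, h]

theorem pv_getD_set_ne (l : List Int) (i m : Nat) (v : Int) (h : m ≠ i) :
    (l.set i v).getD m 0 = l.getD m 0 := by
  simp [List.getD_eq_getElem?_getD, (Ne.symm h)]

theorem pvRipple_last (g p : List Int) (hl : p.length = g.length) (h : g ≠ []) :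
    (pvRipple g p).getD (g.length - 1) 0 = g.getD (g.length - 1) 0 := by
  induction g generalizing p with
  | nil => simp at h
  | cons a g ih =>
    cases p with
    | nil => simp at hl
    | cons b p =>
      rw [pvRipple_cons]
      cases g with
      | nil => simp [pvRipple]
      | cons a' g' =>
        have hlen : (a' :: g').length - 1 + 1 = (a' :: g').length := by simp
        have := ih p (by simpa using hl) (by simp)
        simp only [List.length_cons, Nat.add_sub_cancel] at *
        simpa using this

theorem pvRipple_get (g p : List Int) (hl : p.length = g.length) (j : Nat) (hj : j + 1 < g.length) :
    (pvRipple g p).getD j 0 =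
      pvOr (g.getD j 0) (pvAnd ((pvRipple g p).getD (j+1) 0) (p.getD j 0)) := by
  induction g generalizing p j with
  | nil => simp at hj
  | cons a g ih =>
    cases p with
    | nil => simp at hl
    | cons b p =>
      rw [pvRipple_cons]
      cases j with
      | zero =>
        have hg : g ≠ [] := by intro h; subst h; simp at hj
        have hr : pvRipple g p ≠ [] := by
          intro h
          have := pvRipple_length g p
          rw [h] at this
          exact hg (List.eq_nil_of_length_eq_zero this.symm)
        cases hrr : pvRipple g p with
        | nil => exact absurd hrr hr
        | cons h t => simp [hrr]
      | succ j' =>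
        have := ih p (by simpa using hl) j' (by simpa using hj)
        simpa using this

-- the state invariant: every g-cell is 0 or already its final ripple value; a g-cell can only
-- be 0 if it started 0; a p-cell keeps falsity of its origin; a p-cell may differ from its
-- origin only once its g-cell is final.
def pvInv (gl0 pl0 gl pl : List Int) : Prop :=
  gl.length = gl0.length ∧ pl.length = gl0.length ∧
  ∀ j : Nat, j < gl0.length →
    (gl.getD j 0 = 0 ∨ gl.getD j 0 = (pvRipple gl0 pl0).getD j 0) ∧
    (gl.getD j 0 = 0 → gl0.getD j 0 = 0) ∧
    (pl0.getD j 0 = 0 → pl.getD j 0 = 0) ∧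
    (pl.getD j 0 ≠ pl0.getD j 0 → gl.getD j 0 = (pvRipple gl0 pl0).getD j 0)

def pvFinal (gl0 pl0 gl : List Int) (j : Nat) : Prop :=
  gl.getD j 0 = (pvRipple gl0 pl0).getD j 0

-- a g-update (black cell) preserves the invariant, preserves finality, and finalizes j when
-- j+1 is final.
theorem pv_gupd (gl0 pl0 gl pl : List Int) (hl : pl0.length = gl0.length)
    (hI : pvInv gl0 pl0 gl pl) (j : Nat) (hj : j + 1 < gl0.length) :
    let gl' := gl.set j (pvOr (gl.getD j 0) (pvAnd (gl.getD (j+1) 0) (pl.getD j 0)))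
    pvInv gl0 pl0 gl' pl ∧
    (∀ m, m < gl0.length → pvFinal gl0 pl0 gl m → pvFinal gl0 pl0 gl' m) ∧
    (pvFinal gl0 pl0 gl (j+1) → pvFinal gl0 pl0 gl' j) := by
  intro gl'
  obtain ⟨hg, hp, hidx⟩ := hI
  have hjlen : j < gl.length := by omega
  have hRj : (pvRipple gl0 pl0).getD j 0 =
      pvOr (gl0.getD j 0) (pvAnd ((pvRipple gl0 pl0).getD (j+1) 0) (pl0.getD j 0)) :=
    pvRipple_get gl0 pl0 hl j hj
  obtain ⟨hj1, hj2, hj3, hj4⟩ := hidx j (by omega)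
  obtain ⟨hk1, hk2, hk3, hk4⟩ := hidx (j+1) hj
  -- the value written at j is 0 or the final ripple value, and equals it when j+1 is final
  have key : (gl.getD j 0 = (pvRipple gl0 pl0).getD j 0 →
        pvOr (gl.getD j 0) (pvAnd (gl.getD (j+1) 0) (pl.getD j 0)) = (pvRipple gl0 pl0).getD j 0) ∧
      (pvOr (gl.getD j 0) (pvAnd (gl.getD (j+1) 0) (pl.getD j 0)) = 0 ∨
        pvOr (gl.getD j 0) (pvAnd (gl.getD (j+1) 0) (pl.getD j 0)) = (pvRipple gl0 pl0).getD j 0) ∧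
      (pvOr (gl.getD j 0) (pvAnd (gl.getD (j+1) 0) (pl.getD j 0)) = 0 → gl0.getD j 0 = 0) ∧
      (gl.getD (j+1) 0 = (pvRipple gl0 pl0).getD (j+1) 0 →
        pvOr (gl.getD j 0) (pvAnd (gl.getD (j+1) 0) (pl.getD j 0)) = (pvRipple gl0 pl0).getD j 0) := by
    by_cases hx : gl.getD j 0 = 0
    · have hg0 : gl0.getD j 0 = 0 := hj2 hx
      by_cases hy : gl.getD (j+1) 0 = 0
      · -- written value is 0
        have hval : pvOr (gl.getD j 0) (pvAnd (gl.getD (j+1) 0) (pl.getD j 0)) = 0 := by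
          rw [hx, hy]; simp [pvOr, pvAnd]
        refine ⟨fun hF => ?_, Or.inl hval, fun _ => hg0, fun hF => ?_⟩
        · rw [hval, ← hF, hx]
        · rw [hval, hRj, hg0, ← hF, hy]
          simp [pvOr, pvAnd]
      · have hyR : gl.getD (j+1) 0 = (pvRipple gl0 pl0).getD (j+1) 0 := (hk1.resolve_left hy)
        by_cases hq : pl.getD j 0 = pl0.getD j 0
        · -- writes pvAnd R(j+1) pl0[j] = R[j]
          have : pvOr (gl.getD j 0) (pvAnd (gl.getD (j+1) 0) (pl.getD j 0)) =
              (pvRipple gl0 pl0).getD j 0 := by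
            rw [hx, hRj, hg0, hyR, hq]
          exact ⟨fun _ => this, Or.inr this, fun h0 => hg0, fun _ => this⟩
        · -- p-cell chained ⇒ g-cell final ⇒ R[j] = 0 ⇒ pl0[j] = 0 ⇒ pl[j] = 0
          have hfin : gl.getD j 0 = (pvRipple gl0 pl0).getD j 0 := hj4 hq
          have hR0 : (pvRipple gl0 pl0).getD j 0 = 0 := by rw [← hfin, hx]
          have hO : ∀ z : Int, pvOr 0 z = z := fun z => by unfold pvOr; simp
          have hA : pvAnd (gl.getD (j+1) 0) (pl0.getD j 0) = pl0.getD j 0 := by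
            unfold pvAnd; exact if_neg hy
          have hp0 : pl0.getD j 0 = 0 := by
            rw [hRj, hg0, ← hyR, hO, hA] at hR0
            exact hR0
          have hq0 : pl.getD j 0 = 0 := hj3 hp0
          have : pvOr (gl.getD j 0) (pvAnd (gl.getD (j+1) 0) (pl.getD j 0)) = 0 := by
            rw [hx, hq0]
            unfold pvOr pvAnd
            simp
          exact ⟨fun _ => this.trans hR0.symm, Or.inl this, fun _ => hg0,
            fun _ => this.trans hR0.symm⟩
    · have hv : pvOr (gl.getD j 0) (pvAnd (gl.getD (j+1) 0) (pl.getD j 0)) = gl.getD j 0 := by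
        unfold pvOr; exact if_neg hx
      have hfin : gl.getD j 0 = (pvRipple gl0 pl0).getD j 0 := hj1.resolve_left hx
      exact ⟨fun h => by rw [hv, h], Or.inr (by rw [hv, hfin]), fun h0 => absurd (hv ▸ h0) hx,
        fun _ => by rw [hv, hfin]⟩
  obtain ⟨keyF, keyI, key0, keyC⟩ := key
  have hset_self : gl'.getD j 0 = pvOr (gl.getD j 0) (pvAnd (gl.getD (j+1) 0) (pl.getD j 0)) :=
    pv_getD_set_self _ _ _ hjlen
  have hset_ne : ∀ m, m ≠ j → gl'.getD m 0 = gl.getD m 0 := fun m hm => pv_getD_set_ne _ _ _ _ hm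
  refine ⟨⟨by simp [gl', hg], hp, fun m hm => ?_⟩, fun m hm hF => ?_, fun hF => ?_⟩
  · by_cases hmj : m = j
    · subst hmj
      obtain ⟨h1, h2, h3, h4⟩ := hidx m (by omega)
      rw [hset_self]
      exact ⟨keyI, key0, h3, fun hq => (keyF (h4 hq))⟩
    · rw [hset_ne m hmj]
      exact hidx m hm
  · by_cases hmj : m = j
    · subst hmj
      unfold pvFinal at hF ⊢
      rw [hset_self]
      exact keyF hF
    · unfold pvFinal at hF ⊢
      rw [hset_ne m hmj]
      exact hF
  · unfold pvFinal at hF ⊢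
    rw [hset_self]
    exact keyC hF

-- a p-update at a final position preserves the invariant.
theorem pv_pupd (gl0 pl0 gl pl : List Int) (hl : pl0.length = gl0.length)
    (hI : pvInv gl0 pl0 gl pl) (j : Nat) (hj : j + 1 < gl0.length)
    (hF : pvFinal gl0 pl0 gl j) :
    pvInv gl0 pl0 gl (pl.set j (pvAnd (pl.getD j 0) (pl.getD (j+1) 0))) := by
  obtain ⟨hg, hp, hidx⟩ := hI
  have hjlen : j < pl.length := by omega
  refine ⟨hg, by simp [hp], fun m hm => ?_⟩
  obtain ⟨h1, h2, h3, h4⟩ := hidx m hm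
  by_cases hmj : m = j
  · subst hmj
    rw [pv_getD_set_self _ _ _ hjlen]
    refine ⟨h1, h2, fun hp0 => ?_, fun _ => hF⟩
    rw [h3 hp0]
    simp [pvAnd]
  · rw [pv_getD_set_ne _ _ _ _ hmj]
    exact ⟨h1, h2, h3, h4⟩

-- ===== step-case lemmas for the inner-loop body =====
theorem pvStep_white (i : Nat) (st : PvSt) (j : Int) (hj : j ≠ 0) (hw : st.w < (2:Int)^i) :
    pvInnerStep (i:Int) st j = ⟨st.gl, st.pl, st.w + 1, st.b, st.c⟩ := by
  simp [pvInnerStep, hj, not_le.mpr hw]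

theorem pvStep_reset (i : Nat) (st : PvSt) (j : Int) (hj : j ≠ 0) (hw : (2:Int)^i ≤ st.w)
    (hb : ¬ st.b < (2:Int)^i) :
    pvInnerStep (i:Int) st j = ⟨st.gl, st.pl, 0, 0, st.c⟩ := by
  simp [pvInnerStep, hj, hw, hb]

theorem pvStep_black_p (i : Nat) (st : PvSt) (j : Int) (hj : j ≠ 0) (hw : (2:Int)^i ≤ st.w)
    (hb : st.b < (2:Int)^i) (hc : st.c < (2:Int)^i) :
    pvInnerStep (i:Int) st j =
      ⟨PySem.List.pySetD st.gl j
          (pvOr (PySem.List.pyGetD st.gl j 0)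
                (pvAnd (PySem.List.pyGetD st.gl (j+1) 0) (PySem.List.pyGetD st.pl j 0))),
       PySem.List.pySetD st.pl j
          (pvAnd (PySem.List.pyGetD st.pl j 0) (PySem.List.pyGetD st.pl (j+1) 0)),
       st.w, st.b + 1, st.c + 1⟩ := by
  simp [pvInnerStep, hj, hw, hb, hc]

theorem pvStep_black_np (i : Nat) (st : PvSt) (j : Int) (hj : j ≠ 0) (hw : (2:Int)^i ≤ st.w)
    (hb : st.b < (2:Int)^i) (hc : ¬ st.c < (2:Int)^i) :
    pvInnerStep (i:Int) st j =
      ⟨PySem.List.pySetD st.gl j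
          (pvOr (PySem.List.pyGetD st.gl j 0)
                (pvAnd (PySem.List.pyGetD st.gl (j+1) 0) (PySem.List.pyGetD st.pl j 0))),
       st.pl, st.w, st.b + 1, st.c⟩ := by
  simp [pvInnerStep, hj, hw, hb, hc]

theorem pvStep_white0 (i : Nat) (st : PvSt) (hw : st.w < (2:Int)^i) :
    pvInnerStep (i:Int) st 0 = ⟨st.gl, st.pl, 0, 0, 0⟩ := by
  simp [pvInnerStep, not_le.mpr hw]

theorem pvStep_reset0 (i : Nat) (st : PvSt) (hw : (2:Int)^i ≤ st.w) (hb : ¬ st.b < (2:Int)^i) :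
    pvInnerStep (i:Int) st 0 = ⟨st.gl, st.pl, 0, 0, 0⟩ := by
  simp [pvInnerStep, hw, hb]

theorem pvStep_black_p0 (i : Nat) (st : PvSt) (hw : (2:Int)^i ≤ st.w)
    (hb : st.b < (2:Int)^i) (hc : st.c < (2:Int)^i) :
    pvInnerStep (i:Int) st 0 =
      ⟨PySem.List.pySetD st.gl 0
          (pvOr (PySem.List.pyGetD st.gl 0 0)
                (pvAnd (PySem.List.pyGetD st.gl 1 0) (PySem.List.pyGetD st.pl 0 0))),
       PySem.List.pySetD st.pl 0
          (pvAnd (PySem.List.pyGetD st.pl 0 0) (PySem.List.pyGetD st.pl 1 0)),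
       0, 0, 0⟩ := by
  simp [pvInnerStep, hw, hb, hc]

theorem pvStep_black_np0 (i : Nat) (st : PvSt) (hw : (2:Int)^i ≤ st.w)
    (hb : st.b < (2:Int)^i) (hc : ¬ st.c < (2:Int)^i) :
    pvInnerStep (i:Int) st 0 =
      ⟨PySem.List.pySetD st.gl 0
          (pvOr (PySem.List.pyGetD st.gl 0 0)
                (pvAnd (PySem.List.pyGetD st.gl 1 0) (PySem.List.pyGetD st.pl 0 0))),
       st.pl, 0, 0, 0⟩ := by
  simp [pvInnerStep, hw, hb, hc]

-- ===== white phase =====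
theorem pv_SL_white (i : Nat) (L : List Int) (h0 : ∀ j ∈ L, j ≠ 0) :
    ∀ (gl pl : List Int) (w b c : Int), 0 ≤ w → w + L.length ≤ (2:Int)^i →
    L.foldl (pvInnerStep (i:Int)) ⟨gl, pl, w, b, c⟩ = ⟨gl, pl, w + L.length, b, c⟩ := by
  induction L with
  | nil => intro gl pl w b c _ _; simp
  | cons j L ih =>
    intro gl pl w b c hw hlen
    have hj : j ≠ 0 := h0 j (List.mem_cons_self)
    have hlen' : w + 1 + (L.length : Int) ≤ (2:Int)^i := by
      simp only [List.length_cons] at hlen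
      push_cast at hlen; omega
    have hwlt : w < (2:Int)^i := by
      simp only [List.length_cons] at hlen
      push_cast at hlen; omega
    rw [List.foldl_cons, pvStep_white i _ j hj hwlt,
      ih (fun j' hj' => h0 j' (List.mem_cons_of_mem _ hj')) gl pl (w+1) b c (by omega) hlen']
    simp [PvSt.mk.injEq]
    push_cast
    omega

-- ===== facts about the while-loop computing k =====
theorem pvKCalc_ge (n : Int) (k0 : Nat) : n ≤ (2:Int)^(pvKCalc n k0) := by
  fun_induction pvKCalc n k0 with
  | case1 k h ih => exact ih
  | case2 k h => omega

theorem pvKCalc_lt (n : Int) (k0 : Nat) : ∀ i : Nat, k0 ≤ i → i < pvKCalc n k0 → (2:Int)^i < n := by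
  fun_induction pvKCalc n k0 with
  | case1 k h ih =>
    intro i hki hik
    rcases Nat.eq_or_lt_of_le hki with heq | hlt
    · subst heq; exact h
    · exact ih i hlt hik
  | case2 k h =>
    intro i hki hik
    omega

-- splitting a countdown range
theorem pv_pyRange_split (a c b : Int) (hb : b ≤ c) (hc : c ≤ a) :
    PySem.List.pyRange a b (-1) =
      PySem.List.pyRange a c (-1) ++ PySem.List.pyRange c b (-1) := by
  rw [PySem.List.pyRange_neg_one_eq_reverse, PySem.List.pyRange_neg_one_eq_reverse,
    PySem.List.pyRange_neg_one_eq_reverse,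
    PySem.List.pyRange_one_append (b+1) (c+1) (a+1) (by omega) (by omega),
    List.reverse_append]

-- ===== black block (the 2^i p-updating black cells of a pass) =====
theorem pv_SL_black (gl0 pl0 : List Int) (hl : pl0.length = gl0.length) (i : Nat) (m : Nat) :
    ∀ (a : Nat) (gl pl : List Int) (b : Int), m ≤ a → a + 1 < gl0.length →
    pvInv gl0 pl0 gl pl →
    (∀ idx : Nat, a < idx → idx < gl0.length → pvFinal gl0 pl0 gl idx) →
    0 ≤ b → b + m ≤ (2:Int)^i →
    ∃ gl' pl',
      (PySem.List.pyRange (a:Int) ((a:Int) - m) (-1)).foldl (pvInnerStep (i:Int))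
          ⟨gl, pl, (2:Int)^i, b, b⟩ = ⟨gl', pl', (2:Int)^i, b + m, b + m⟩ ∧
      pvInv gl0 pl0 gl' pl' ∧
      (∀ idx : Nat, (a:Int) - m < (idx:Int) → idx < gl0.length → pvFinal gl0 pl0 gl' idx) := by
  induction m with
  | zero =>
    intro a gl pl b _ _ hInv hFin _ _
    refine ⟨gl, pl, ?_, hInv, fun idx h1 h2 => hFin idx (by omega) h2⟩
    rw [show (a:Int) - ((0:Nat):Int) = (a:Int) by push_cast; ring,
      PySem.List.pyRange_neg_one_eq_nil le_rfl]
    simp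
  | succ m ih =>
    intro a gl pl b hma hlen hInv hFin hb0 hbm
    have ha1 : 1 ≤ a := by omega
    have hcons : PySem.List.pyRange (a:Int) ((a:Int) - ((m+1:Nat):Int)) (-1)
        = (a:Int) :: PySem.List.pyRange ((a:Int) - 1) ((a:Int) - ((m+1:Nat):Int)) (-1) :=
      PySem.List.pyRange_neg_one_cons (by push_cast; omega)
    have hbi : b < (2:Int)^i := by push_cast at hbm; omega
    have hstep := pvStep_black_p i ⟨gl, pl, (2:Int)^i, b, b⟩ (a:Int) (by omega) le_rfl hbi hbi
    have hc1 : (a:Int) + 1 = ((a+1 : Nat) : Int) := by push_cast; ring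
    rw [hc1] at hstep
    simp only [PySem.List.pySetD_natCast, PySem.List.pyGetD_natCast] at hstep
    obtain ⟨hI1, hPres, hFin1⟩ := pv_gupd gl0 pl0 gl pl hl hInv a hlen
    have hFa : pvFinal gl0 pl0
        (gl.set a (pvOr (gl.getD a 0) (pvAnd (gl.getD (a+1) 0) (pl.getD a 0)))) a :=
      hFin1 (hFin (a+1) (by omega) hlen)
    have hI2 := pv_pupd gl0 pl0 _ pl hl hI1 a hlen hFa
    have hFin2 : ∀ idx : Nat, a - 1 < idx → idx < gl0.length →
        pvFinal gl0 pl0 (gl.set a (pvOr (gl.getD a 0) (pvAnd (gl.getD (a+1) 0) (pl.getD a 0)))) idx := by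
      intro idx h1 h2
      rcases Nat.eq_or_lt_of_le (show a ≤ idx by omega) with heq | hlt
      · exact heq ▸ hFa
      · exact hPres idx h2 (hFin idx hlt h2)
    obtain ⟨gl', pl', heq, hI3, hFin3⟩ := ih (a-1) _ _ (b+1) (by omega) (by omega) hI2 hFin2
      (by omega) (by push_cast at hbm ⊢; omega)
    refine ⟨gl', pl', ?_, hI3, fun idx h1 h2 => hFin3 idx (by omega) h2⟩
    rw [hcons, List.foldl_cons, hstep]
    have hlist : PySem.List.pyRange ((a:Int) - 1) ((a:Int) - ((m+1:Nat):Int)) (-1)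
        = PySem.List.pyRange ((a-1:Nat):Int) (((a-1:Nat):Int) - ((m:Nat):Int)) (-1) := by
      congr 1 <;> omega
    rw [hlist, heq]
    have hbc : b + 1 + ((m:Nat):Int) = b + ((m+1:Nat):Int) := by push_cast; ring
    rw [hbc]

-- ===== remainder of a pass: never p-updates once counter ≥ 2^i =====
theorem pv_SL_rest (gl0 pl0 : List Int) (hl : pl0.length = gl0.length) (i : Nat) (m : Nat) :
    ∀ (gl pl : List Int) (w b c : Int), m + 1 < gl0.length →
    pvInv gl0 pl0 gl pl → (2:Int)^i ≤ c →
    ∃ gl' pl',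
      (PySem.List.pyRange ((m:Nat):Int) (-1) (-1)).foldl (pvInnerStep (i:Int)) ⟨gl, pl, w, b, c⟩
        = ⟨gl', pl', 0, 0, 0⟩ ∧
      pvInv gl0 pl0 gl' pl' ∧
      (∀ idx : Nat, idx < gl0.length → pvFinal gl0 pl0 gl idx → pvFinal gl0 pl0 gl' idx) := by
  induction m with
  | zero =>
    intro gl pl w b c hmlen hInv hc
    have hlist : PySem.List.pyRange ((0:Nat):Int) (-1) (-1) = [((0:Nat):Int)] := by
      rw [PySem.List.pyRange_neg_one_cons (by omega)]
      rw [show ((0:Nat):Int) - 1 = -1 by omega, PySem.List.pyRange_neg_one_eq_nil le_rfl]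
    rw [hlist]
    by_cases hw : (2:Int)^i ≤ w
    · by_cases hb : b < (2:Int)^i
      · -- black cell at j = 0, no p-update since counter ≥ 2^i
        have hstep := pvStep_black_np0 i ⟨gl, pl, w, b, c⟩ hw hb (not_lt.mpr hc)
        have e0g : PySem.List.pyGetD gl 0 0 = gl.getD 0 0 := by
          exact_mod_cast PySem.List.pyGetD_natCast gl 0 0
        have e1g : PySem.List.pyGetD gl 1 0 = gl.getD 1 0 := by
          exact_mod_cast PySem.List.pyGetD_natCast gl 1 0
        have e0p : PySem.List.pyGetD pl 0 0 = pl.getD 0 0 := by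
          exact_mod_cast PySem.List.pyGetD_natCast pl 0 0
        have eS : ∀ v : Int, PySem.List.pySetD gl 0 v = gl.set 0 v := fun v => by
          exact_mod_cast PySem.List.pySetD_natCast gl 0 v
        rw [e0g, e1g, e0p, eS] at hstep
        obtain ⟨hI1, hPres, _⟩ := pv_gupd gl0 pl0 gl pl hl hInv 0 (by omega)
        refine ⟨_, pl, ?_, hI1, fun idx h1 hF => hPres idx h1 hF⟩
        rw [List.foldl_cons, List.foldl_nil,
          show ((0:Nat):Int) = (0:Int) from rfl, hstep]
      · refine ⟨gl, pl, ?_, hInv, fun idx _ hF => hF⟩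
        rw [List.foldl_cons, List.foldl_nil,
          show ((0:Nat):Int) = (0:Int) from rfl, pvStep_reset0 i ⟨gl, pl, w, b, c⟩ hw hb]
    · refine ⟨gl, pl, ?_, hInv, fun idx _ hF => hF⟩
      rw [List.foldl_cons, List.foldl_nil,
        show ((0:Nat):Int) = (0:Int) from rfl, pvStep_white0 i ⟨gl, pl, w, b, c⟩ (not_le.mp hw)]
  | succ m ih =>
    intro gl pl w b c hmlen hInv hc
    have hj : ((m+1:Nat):Int) ≠ 0 := by omega
    have hcons : PySem.List.pyRange ((m+1:Nat):Int) (-1) (-1)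
        = ((m+1:Nat):Int) :: PySem.List.pyRange (((m+1:Nat):Int) - 1) (-1) (-1) :=
      PySem.List.pyRange_neg_one_cons (by omega)
    have hcast : ((m+1:Nat):Int) - 1 = ((m:Nat):Int) := by push_cast; ring
    rw [hcons, hcast, List.foldl_cons]
    by_cases hw : (2:Int)^i ≤ w
    · by_cases hb : b < (2:Int)^i
      · have hstep := pvStep_black_np i ⟨gl, pl, w, b, c⟩ ((m+1:Nat):Int) hj hw hb (not_lt.mpr hc)
        have hc1 : ((m+1:Nat):Int) + 1 = ((m+2 : Nat) : Int) := by push_cast; ring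
        rw [hc1] at hstep
        simp only [PySem.List.pySetD_natCast, PySem.List.pyGetD_natCast] at hstep
        obtain ⟨hI1, hPres, _⟩ := pv_gupd gl0 pl0 gl pl hl hInv (m+1) (by omega)
        obtain ⟨gl', pl', heq, hI3, hPres2⟩ := ih _ pl w (b+1) c (by omega) hI1 hc
        refine ⟨gl', pl', ?_, hI3, fun idx h1 hF => hPres2 idx h1 (hPres idx h1 hF)⟩
        rw [hstep]
        exact heq
      · have hstep := pvStep_reset i ⟨gl, pl, w, b, c⟩ ((m+1:Nat):Int) hj hw hb
        obtain ⟨gl', pl', heq, hI3, hPres2⟩ := ih gl pl 0 0 c (by omega) hInv hc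
        refine ⟨gl', pl', ?_, hI3, hPres2⟩
        rw [hstep]
        exact heq
    · have hstep := pvStep_white i ⟨gl, pl, w, b, c⟩ ((m+1:Nat):Int) hj (not_le.mp hw)
      obtain ⟨gl', pl', heq, hI3, hPres2⟩ := ih gl pl (w+1) b c (by omega) hInv hc
      refine ⟨gl', pl', ?_, hI3, hPres2⟩
      rw [hstep]
      exact heq

-- ===== one full pass of the outer loop doubles the finalized suffix =====
theorem pv_SL_pass (gl0 pl0 : List Int) (hl : pl0.length = gl0.length) (n : Int)
    (hn : n.toNat = gl0.length) (i : Nat) (hTn : (2:Int)^i < n)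
    (gl pl : List Int) (hInv : pvInv gl0 pl0 gl pl)
    (hFin : ∀ idx : Nat, idx < gl0.length → (gl0.length:Int) - 2^i ≤ (idx:Int) →
      pvFinal gl0 pl0 gl idx) :
    ∃ gl' pl',
      (PySem.List.pyRange (n-1) (-1) (-1)).foldl (pvInnerStep (i:Int)) ⟨gl, pl, 0, 0, 0⟩
        = ⟨gl', pl', 0, 0, 0⟩ ∧
      pvInv gl0 pl0 gl' pl' ∧
      (∀ idx : Nat, idx < gl0.length → (gl0.length:Int) - 2^(i+1) ≤ (idx:Int) →
        pvFinal gl0 pl0 gl' idx) := by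
  have ht1 : (1:Int) ≤ 2^i := one_le_pow₀ (by norm_num)
  set N := gl0.length with hN
  set t : Nat := 2^i with ht
  have htI : ((t:Nat):Int) = (2:Int)^i := by rw [ht]; push_cast; ring
  have htN : (t:Int) < (N:Int) := by omega
  have ht1n : 1 ≤ t := Nat.one_le_two_pow
  have hnN : (N:Int) = n := by omega
  -- white phase
  have hmem1 : ∀ j ∈ PySem.List.pyRange (n-1) (n-1-(t:Int)) (-1), j ≠ 0 := by
    intro j hj
    rw [PySem.List.mem_pyRange_neg_one] at hj
    omega
  have hlen1 : ((PySem.List.pyRange (n-1) (n-1-(t:Int)) (-1)).length : Int) = (t:Int) := by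
    rw [PySem.List.length_pyRange_neg_one]
    omega
  have hwhite : (PySem.List.pyRange (n-1) (n-1-(t:Int)) (-1)).foldl (pvInnerStep (i:Int))
      ⟨gl, pl, 0, 0, 0⟩ = ⟨gl, pl, (2:Int)^i, 0, 0⟩ := by
    rw [pv_SL_white i _ hmem1 gl pl 0 0 0 le_rfl (by rw [hlen1]; omega)]
    rw [hlen1, zero_add, htI]
  have hsplit1 : PySem.List.pyRange (n-1) (-1) (-1)
      = PySem.List.pyRange (n-1) (n-1-(t:Int)) (-1)
        ++ PySem.List.pyRange (n-1-(t:Int)) (-1) (-1) :=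
    pv_pyRange_split _ _ _ (by omega) (by omega)
  set a : Nat := N - 1 - t with ha
  have haI : ((a:Nat):Int) = n - 1 - (t:Int) := by omega
  have haFin : ∀ idx : Nat, a < idx → idx < N → pvFinal gl0 pl0 gl idx := by
    intro idx h1 h2
    exact hFin idx h2 (by omega)
  by_cases h2 : 2 * (2:Int)^i < n
  · -- full black block of 2^i p-updating cells, then the remainder of the pass
    obtain ⟨glB, plB, hbeq, hIB, hFinB⟩ :=
      pv_SL_black gl0 pl0 hl i t a gl pl 0 (by omega) (by omega) hInv haFin le_rfl
        (by omega)
    have hbeq' : (PySem.List.pyRange (n-1-(t:Int)) (n-1-2*(t:Int)) (-1)).foldl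
        (pvInnerStep (i:Int)) ⟨gl, pl, (2:Int)^i, 0, 0⟩ = ⟨glB, plB, (2:Int)^i, (t:Int), (t:Int)⟩ := by
      have hlst : PySem.List.pyRange (n-1-(t:Int)) (n-1-2*(t:Int)) (-1)
          = PySem.List.pyRange ((a:Nat):Int) (((a:Nat):Int) - (t:Int)) (-1) := by
        congr 1 <;> omega
      rw [hlst, hbeq]
      rw [zero_add]
    set mr : Nat := N - 1 - 2*t with hmr
    have hmrI : ((mr:Nat):Int) = n - 1 - 2*(t:Int) := by omega
    obtain ⟨glC, plC, hreq, hIC, hPresC⟩ :=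
      pv_SL_rest gl0 pl0 hl i mr glB plB ((2:Int)^i) (t:Int) (t:Int) (by omega) hIB
        (by omega)
    refine ⟨glC, plC, ?_, hIC, ?_⟩
    · rw [hsplit1, List.foldl_append, hwhite,
        pv_pyRange_split (n-1-(t:Int)) (n-1-2*(t:Int)) (-1) (by omega) (by omega),
        List.foldl_append, hbeq']
      rw [show PySem.List.pyRange (n-1-2*(t:Int)) (-1) (-1)
          = PySem.List.pyRange ((mr:Nat):Int) (-1) (-1) by rw [hmrI], hreq]
    · intro idx h1 h2
      have h2' : 2^(i+1) = 2 * (2:Int)^i := by ring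
      exact hPresC idx h1 (hFinB idx (by omega) h1)
  · -- the pass runs out of cells: the black block reaches j = 0
    obtain ⟨glB, plB, hbeq, hIB, hFinB⟩ :=
      pv_SL_black gl0 pl0 hl i a a gl pl 0 le_rfl (by omega) hInv haFin le_rfl
        (by omega)
    have hzero : PySem.List.pyRange 0 (-1) (-1) = [(0:Int)] := by
      rw [PySem.List.pyRange_neg_one_cons (by omega),
        show (0:Int) - 1 = -1 by ring, PySem.List.pyRange_neg_one_eq_nil le_rfl]
    have hbeq' : (PySem.List.pyRange (n-1-(t:Int)) 0 (-1)).foldl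
        (pvInnerStep (i:Int)) ⟨gl, pl, (2:Int)^i, 0, 0⟩ = ⟨glB, plB, (2:Int)^i, (a:Int), (a:Int)⟩ := by
      have hlst : PySem.List.pyRange (n-1-(t:Int)) 0 (-1)
          = PySem.List.pyRange ((a:Nat):Int) (((a:Nat):Int) - (a:Int)) (-1) := by
        congr 1 <;> omega
      rw [hlst, hbeq, zero_add]
    have hstep := pvStep_black_p0 i ⟨glB, plB, (2:Int)^i, (a:Int), (a:Int)⟩ le_rfl
      (show ((a:Nat):Int) < (2:Int)^i by omega) (show ((a:Nat):Int) < (2:Int)^i by omega)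
    have e0g : PySem.List.pyGetD glB 0 0 = glB.getD 0 0 := by
      exact_mod_cast PySem.List.pyGetD_natCast glB 0 0
    have e1g : PySem.List.pyGetD glB 1 0 = glB.getD 1 0 := by
      exact_mod_cast PySem.List.pyGetD_natCast glB 1 0
    have e0p : PySem.List.pyGetD plB 0 0 = plB.getD 0 0 := by
      exact_mod_cast PySem.List.pyGetD_natCast plB 0 0
    have e1p : PySem.List.pyGetD plB 1 0 = plB.getD 1 0 := by
      exact_mod_cast PySem.List.pyGetD_natCast plB 1 0
    have eSg : ∀ v : Int, PySem.List.pySetD glB 0 v = glB.set 0 v := fun v => by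
      exact_mod_cast PySem.List.pySetD_natCast glB 0 v
    have eSp : ∀ v : Int, PySem.List.pySetD plB 0 v = plB.set 0 v := fun v => by
      exact_mod_cast PySem.List.pySetD_natCast plB 0 v
    rw [e0g, e1g, e0p, e1p, eSg, eSp] at hstep
    obtain ⟨hI1, hPres, hFin1⟩ := pv_gupd gl0 pl0 glB plB hl hIB 0 (by omega)
    have hF0 : pvFinal gl0 pl0
        (glB.set 0 (pvOr (glB.getD 0 0) (pvAnd (glB.getD (0+1) 0) (plB.getD 0 0)))) 0 :=
      hFin1 (hFinB 1 (by omega) (by omega))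
    have hI2 := pv_pupd gl0 pl0 _ plB hl hI1 0 (by omega) hF0
    refine ⟨_, _, ?_, hI2, ?_⟩
    · rw [hsplit1, List.foldl_append, hwhite,
        pv_pyRange_split (n-1-(t:Int)) 0 (-1) (by omega) (by omega),
        List.foldl_append, hbeq', hzero]
      rw [List.foldl_cons, List.foldl_nil, hstep]
    · intro idx h1 h2
      rcases Nat.eq_zero_or_pos idx with h0 | hpos
      · subst h0; exact hF0
      · exact hPres idx h1 (hFinB idx (by omega) h1)

-- ===== the outer loop: after all k passes every cell is final =====
theorem pv_SL_outer (gl0 pl0 : List Int) (hl : pl0.length = gl0.length) (n : Int)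
    (hn : n.toNat = gl0.length) (k : Nat) (hk : ∀ i : Nat, i < k → (2:Int)^i < n) :
    ∀ (d i0 : Nat), i0 + d = k → ∀ gl pl, pvInv gl0 pl0 gl pl →
    (∀ idx : Nat, idx < gl0.length → (gl0.length:Int) - 2^i0 ≤ (idx:Int) →
      pvFinal gl0 pl0 gl idx) →
    ∃ gl' pl',
      (PySem.List.pyRange ((i0:Nat):Int) ((k:Nat):Int) 1).foldl
        (fun st ii => (PySem.List.pyRange (n-1) (-1) (-1)).foldl (pvInnerStep ii) st)
        ⟨gl, pl, 0, 0, 0⟩ = ⟨gl', pl', 0, 0, 0⟩ ∧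
      pvInv gl0 pl0 gl' pl' ∧
      (∀ idx : Nat, idx < gl0.length → (gl0.length:Int) - 2^k ≤ (idx:Int) →
        pvFinal gl0 pl0 gl' idx) := by
  intro d
  induction d with
  | zero =>
    intro i0 h0 gl pl hInv hFin
    have : i0 = k := by omega
    subst this
    rw [PySem.List.pyRange_one_eq_nil le_rfl]
    exact ⟨gl, pl, rfl, hInv, hFin⟩
  | succ d ih =>
    intro i0 h0 gl pl hInv hFin
    have hik : ((i0:Nat):Int) < ((k:Nat):Int) := by omega
    rw [PySem.List.pyRange_one_cons hik, List.foldl_cons]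
    obtain ⟨glP, plP, hpeq, hIP, hFinP⟩ :=
      pv_SL_pass gl0 pl0 hl n hn i0 (hk i0 (by omega)) gl pl hInv hFin
    rw [hpeq]
    have hcast : ((i0:Nat):Int) + 1 = ((i0+1:Nat):Int) := by push_cast; ring
    rw [hcast]
    exact ih (i0+1) (by omega) glP plP hIP hFinP

-- ===== the initial copy loop =====
theorem pv_set_fold (f h : Nat → Int) :
    ∀ (M : Nat) (xs ys : List Int), M ≤ xs.length → M ≤ ys.length →
    (List.range M).foldl
        (fun (st : List Int × List Int) i => (st.1.set i (f i), st.2.set i (h i))) (xs, ys)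
      = ((List.range M).map f ++ xs.drop M, (List.range M).map h ++ ys.drop M) := by
  intro M
  induction M with
  | zero => intro xs ys _ _; simp
  | succ M ih =>
    intro xs ys hx hy
    rw [List.range_succ, List.foldl_append, ih xs ys (by omega) (by omega)]
    simp only [List.foldl_cons, List.foldl_nil]
    have key : ∀ (zs : List Int) (g : Nat → Int), M < zs.length →
        ((List.range M).map g ++ zs.drop M).set M (g M)
          = (List.range (M+1)).map g ++ zs.drop (M+1) := by
      intro zs g hz
      have hlen : ((List.range M).map g).length = M := by simp
      rw [List.set_append_right M (g M) (le_of_eq hlen), hlen, Nat.sub_self,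
        List.drop_eq_getElem_cons hz, List.set_cons_zero]
      simp [List.range_succ]
    rw [key xs f (by omega), key ys h (by omega)]
    simp [List.range_succ]

-- ===== port A computes the ripple =====
theorem pv_A_eq (n : Int) (g_0 p_0 : List Int) (hn0 : 0 < n)
    (hg : n ≤ (g_0.length:Int)) (hp : n ≤ (p_0.length:Int)) :
    parallel_prefix n g_0 p_0 =
      pvRipple ((List.range n.toNat).map (fun j => g_0.getD j 0))
               ((List.range n.toNat).map (fun j => p_0.getD j 0)) := by
  set N := n.toNat with hNdef
  set gl0 : List Int := (List.range N).map (fun j => g_0.getD j 0) with hgl0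
  set pl0 : List Int := (List.range N).map (fun j => p_0.getD j 0) with hpl0
  have hgl0len : gl0.length = N := by rw [hgl0]; simp
  have hpl0len : pl0.length = N := by rw [hpl0]; simp
  have hN1 : 1 ≤ N := by omega
  have hRlast : pvFinal gl0 pl0 gl0 (N-1) := by
    unfold pvFinal
    have := pvRipple_last gl0 pl0 (by omega) (by
      intro h; rw [h] at hgl0len; simp at hgl0len; omega)
    rw [hgl0len] at this
    exact this.symm
  have hInv0 : pvInv gl0 pl0 gl0 pl0 := by
    refine ⟨by omega, by omega, fun j hj => ?_⟩
    refine ⟨?_, fun h => h, fun h => h, fun h => absurd rfl h⟩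
    by_cases hz : gl0.getD j 0 = 0
    · exact Or.inl hz
    · right
      rcases Nat.lt_or_ge (j+1) N with hlt | hge
      · rw [pvRipple_get gl0 pl0 (by omega) j (by omega)]
        unfold pvOr
        rw [if_neg hz]
      · have hj1 : j = N - 1 := by omega
        rw [hj1]
        exact hRlast
  have hFin0 : ∀ idx : Nat, idx < gl0.length → (gl0.length:Int) - 2^(0:Nat) ≤ (idx:Int) →
      pvFinal gl0 pl0 gl0 idx := by
    intro idx h1 h2
    rw [hgl0len] at h1 h2
    have : idx = N - 1 := by simp at h2; omega
    rw [this]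
    exact hRlast
  simp only [parallel_prefix]
  -- the initial copy loop builds (pl0, gl0)
  have hrange : PySem.List.pyRange 0 n 1 = (List.range N).map (fun k : Nat => ((k:Nat):Int)) := by
    rw [PySem.List.pyRange_one]
    simp [hNdef]
  rw [hrange, List.foldl_map]
  simp only [PySem.List.pySetD_natCast, PySem.List.pyGetD_natCast]
  rw [pv_set_fold (fun i => p_0.getD i 0) (fun i => g_0.getD i 0) N
    (List.replicate N 0) (List.replicate N 0) (by simp) (by simp)]
  simp only [show List.drop N (List.replicate N (0:Int)) = [] from
    List.drop_eq_nil_of_le (by simp), List.append_nil]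
  -- the passes
  obtain ⟨gl', pl', heq, hI, hFin⟩ :=
    pv_SL_outer gl0 pl0 (by omega) n (by omega) (pvKCalc n 0)
      (fun i hi => pvKCalc_lt n 0 i (Nat.zero_le i) hi) (pvKCalc n 0) 0 (by omega)
      gl0 pl0 hInv0 hFin0
  rw [show ((0:Nat):Int) = (0:Int) from rfl] at heq
  rw [heq]
  show gl' = pvRipple gl0 pl0
  have hall : ∀ j : Nat, j < N → gl'.getD j 0 = (pvRipple gl0 pl0).getD j 0 := by
    intro j hj
    refine hFin j (by omega) ?_
    have h2k := pvKCalc_ge n 0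
    omega
  have hgl'len : gl'.length = N := by
    obtain ⟨h1, _, _⟩ := hI
    omega
  have hRlen : (pvRipple gl0 pl0).length = N := by rw [pvRipple_length]; omega
  apply List.ext_getElem (by omega)
  intro j h1 h2
  have := hall j (by omega)
  rwa [List.getD_eq_getElem _ _ (by omega), List.getD_eq_getElem _ _ (by omega)] at this

-- ===== port B computes the ripple =====
theorem pv_B_eq (n : Int) (g_0 p_0 : List Int) (hn0 : 0 < n)
    (hg : n ≤ (g_0.length:Int)) (hp : n ≤ (p_0.length:Int)) :
    parallel_prefix_alt n g_0 p_0 =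
      pvRipple ((List.range n.toNat).map (fun j => g_0.getD j 0))
               ((List.range n.toNat).map (fun j => p_0.getD j 0)) := by
  set N := n.toNat with hNdef
  set gl0 : List Int := (List.range N).map (fun j => g_0.getD j 0) with hgl0
  set pl0 : List Int := (List.range N).map (fun j => p_0.getD j 0) with hpl0
  set R : List Int := pvRipple gl0 pl0 with hR
  have hgl0len : gl0.length = N := by rw [hgl0]; simp
  have hpl0len : pl0.length = N := by rw [hpl0]; simp
  have hRlen : R.length = N := by rw [hR, pvRipple_length]; omega
  have hN1 : 1 ≤ N := by omega
  have key : ∀ i : Nat, i ≤ N →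
      (PySem.List.pyRange ((i:Int)-1) (-1) (-1)).foldl
        (fun res idx =>
          match res with
          | [] => [PySem.List.pyGetD g_0 idx 0]
          | h :: t =>
            (pvOr (PySem.List.pyGetD g_0 idx 0) (pvAnd h (PySem.List.pyGetD p_0 idx 0))) :: h :: t)
        (R.drop i) = R := by
    intro i
    induction i with
    | zero =>
      intro _
      rw [PySem.List.pyRange_neg_one_eq_nil (by omega)]
      simp
    | succ i ih =>
      intro hi
      rw [show ((i+1:Nat):Int) - 1 = ((i:Nat):Int) by push_cast; ring,
        PySem.List.pyRange_neg_one_cons (by omega), List.foldl_cons]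
      have hstep : (match R.drop (i+1) with
          | [] => [PySem.List.pyGetD g_0 ((i:Nat):Int) 0]
          | h :: t =>
            (pvOr (PySem.List.pyGetD g_0 ((i:Nat):Int) 0)
              (pvAnd h (PySem.List.pyGetD p_0 ((i:Nat):Int) 0))) :: h :: t) = R.drop i := by
        have hgd : PySem.List.pyGetD g_0 ((i:Nat):Int) 0 = gl0.getD i 0 := by
          rw [PySem.List.pyGetD_natCast, hgl0, PySem.List.getD_map_range _ _ _ _ (by omega)]
        have hpd : PySem.List.pyGetD p_0 ((i:Nat):Int) 0 = pl0.getD i 0 := by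
          rw [PySem.List.pyGetD_natCast, hpl0, PySem.List.getD_map_range _ _ _ _ (by omega)]
        rcases Nat.lt_or_ge (i+1) N with hlt | hge
        · rw [List.drop_eq_getElem_cons (by omega), List.drop_eq_getElem_cons (show i < R.length by omega)]
          have hhead : R[i]'(by omega) =
              pvOr (gl0.getD i 0) (pvAnd (R.getD (i+1) 0) (pl0.getD i 0)) := by
            rw [← List.getD_eq_getElem R 0 (by omega), hR]
            exact pvRipple_get gl0 pl0 (by omega) i (by omega)
          rw [List.drop_eq_getElem_cons (show i+1 < R.length by omega)]
          simp only []
          rw [hgd, hpd, hhead, List.getD_eq_getElem R 0 (show i+1 < R.length by omega)]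
        · have hiN : i = N - 1 := by omega
          have hdropN : R.drop (i+1) = [] := by
            apply List.drop_eq_nil_of_le
            omega
          rw [hdropN, List.drop_eq_getElem_cons (show i < R.length by omega)]
          have hdropN2 : R.drop (i+1) = [] := hdropN
          simp only []
          rw [hgd]
          have hlast : R[i]'(by omega) = gl0.getD i 0 := by
            rw [← List.getD_eq_getElem R 0 (by omega), hR]
            have := pvRipple_last gl0 pl0 (by omega) (by
              intro h; rw [h] at hgl0len; simp at hgl0len; omega)
            rw [hgl0len] at this
            rw [hiN]
            exact this
          rw [hlast, hdropN]
      rw [hstep]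
      exact ih (by omega)
  simp only [parallel_prefix_alt]
  have hstart : R.drop N = ([] : List Int) := List.drop_eq_nil_of_le (by omega)
  have hn1 : n - 1 = ((N:Nat):Int) - 1 := by omega
  rw [hn1]
  have hk := key N le_rfl
  rw [hstart] at hk
  exact hk

theorem parallel_prefix_spec : Claim_equal_parallel_prefix := by
  intro n g_0 p_0 hDom hPre
  unfold Spec_parallel_prefix
  obtain ⟨hg, hp⟩ := hPre
  by_cases hn : n ≤ 0
  · have hA : parallel_prefix n g_0 p_0 = [] := by
      simp only [parallel_prefix]
      have h1 : PySem.List.pyRange 0 n 1 = [] := PySem.List.pyRange_one_eq_nil hn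
      have h2 : pvKCalc n 0 = 0 := by
        rw [pvKCalc]
        rw [if_neg (by norm_num; omega)]
      have h3 : n.toNat = 0 := by omega
      rw [h1, h2, h3]
      rw [show ((0:Nat):Int) = (0:Int) from rfl, PySem.List.pyRange_one_eq_nil le_rfl]
      simp
    have hB : parallel_prefix_alt n g_0 p_0 = [] := by
      simp only [parallel_prefix_alt]
      rw [PySem.List.pyRange_neg_one_eq_nil (by omega)]
      rfl
    rw [hA, hB]
  · push_neg at hn
    rw [pv_A_eq n g_0 p_0 hn hg hp, pv_B_eq n g_0 p_0 hn hg hp]
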